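-- pv_equiv track=rewrite | github.com/DerSchneemann94/Bachelor-Arbeit | Experiment/src/Data/DatasetsStatistics/DatasetStatisticsCreator.py | __update_statistic_dataframe
-- ===== SOURCE A (Python) =====
-- from typing import Dict, List
--
-- def __update_statistic_dataframe(feature_types, dataframe_initializer_json, number_of_entries):
--     feature_types_keys: List = feature_types.keys()
--     dataframe_initializer_json_keys: List = list(dataframe_initializer_json.keys())
--
--     for data_type in feature_types_keys:
--         number_of_features = len(feature_types[data_type])
--         if data_type in dataframe_initializer_json.keys():
--             dataframe_initializer_json[data_type].append(number_of_features)
--             dataframe_initializer_json_keys.remove(data_type)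
--         else:
--             dataframe_initializer_json[data_type] = [0] * number_of_entries
--             dataframe_initializer_json[data_type].append(number_of_features)
--
--     for data_type in dataframe_initializer_json_keys:
--         dataframe_initializer_json[data_type].append(0)
--     return dataframe_initializer_json
-- ===== SOURCE B (Python) =====
-- def __update_statistic_dataframe(feature_types, dataframe_initializer_json, number_of_entries):
--     # One branching pass over the existing columns, then add the missing feature-type
--     # columns; no remaining-keys tracker, no .remove calls.
--     for key, column in dataframe_initializer_json.items():
--         column.append(len(feature_types[key]) if key in feature_types else 0)
--     for key, features in feature_types.items():
--         if key not in dataframe_initializer_json: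
--             dataframe_initializer_json[key] = [0] * number_of_entries + [len(features)]
--     return dataframe_initializer_json
-- ===== Notes on version B (the rewrite author's own statement) =====
-- stated objective: simpler
-- what changed: Replaces A's maintained remaining-keys list (with .remove bookkeeping) and its two disjoint passes by one branching pass over the existing columns (append len or 0 per key) plus one pass adding the missing feature-type columns.
import Mathlib
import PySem

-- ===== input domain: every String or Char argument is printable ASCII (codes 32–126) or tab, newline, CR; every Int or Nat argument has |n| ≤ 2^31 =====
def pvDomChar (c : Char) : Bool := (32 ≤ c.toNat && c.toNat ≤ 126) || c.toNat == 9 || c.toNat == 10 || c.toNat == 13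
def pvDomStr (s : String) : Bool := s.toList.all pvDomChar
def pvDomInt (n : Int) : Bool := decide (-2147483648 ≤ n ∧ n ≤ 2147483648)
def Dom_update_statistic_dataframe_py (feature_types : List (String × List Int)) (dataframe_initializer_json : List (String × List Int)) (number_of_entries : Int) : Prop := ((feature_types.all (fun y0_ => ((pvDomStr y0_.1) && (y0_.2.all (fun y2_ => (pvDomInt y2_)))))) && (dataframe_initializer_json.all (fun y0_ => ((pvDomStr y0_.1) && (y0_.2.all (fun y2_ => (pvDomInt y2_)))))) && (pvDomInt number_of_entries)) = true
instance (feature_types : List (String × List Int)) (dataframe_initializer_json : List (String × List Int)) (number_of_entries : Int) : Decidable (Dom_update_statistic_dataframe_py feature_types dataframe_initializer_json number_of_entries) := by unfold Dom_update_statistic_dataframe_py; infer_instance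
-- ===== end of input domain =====

-- B replaces A's maintained remaining-keys list and two disjoint passes by one branching
-- pass over the existing columns plus one pass adding missing feature-type columns
-- (objective: simpler). Both the Python A and the Python B mutate
-- dataframe_initializer_json in place in the same way; the theorems are about the
-- returned value.

-- ===== PORT A =====
-- feature_types[data_type] is read as (get? _).getD []: data_type always comes from
-- feature_types' own keys, so Python's KeyError branch is unreachable and this is exact.
def update_statistic_dataframe_py (feature_types : List (String × List Int)) (dataframe_initializer_json : List (String × List Int)) (number_of_entries : Int) : List (String × List Int) :=
  let ftD : PySem.Dict String (List Int) := PySem.Dict.mk feature_types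
  let feature_types_keys : List String := ftD.keys
  let dataframe_initializer_json_keys : List String := (PySem.Dict.mk dataframe_initializer_json).keys
  let st := feature_types_keys.foldl
    (fun (st : PySem.Dict String (List Int) × List String) data_type =>
      let number_of_features : Int := ((ftD.get? data_type).getD []).length
      if st.1.contains data_type then
        (st.1.modify data_type [] (fun l => l ++ [number_of_features]),
         (PySem.List.remove? st.2 data_type).getD st.2)
      else
        ((st.1.insert data_type (List.replicate number_of_entries.toNat 0)).modify data_type []
           (fun l => l ++ [number_of_features]),
         st.2))
    (PySem.Dict.mk dataframe_initializer_json, dataframe_initializer_json_keys)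
  (st.2.foldl (fun d data_type => d.modify data_type [] (fun l => l ++ [(0 : Int)])) st.1).items

-- ===== PORT B =====
def update_statistic_dataframe_py_alt (feature_types : List (String × List Int)) (dataframe_initializer_json : List (String × List Int)) (number_of_entries : Int) : List (String × List Int) :=
  let ftD : PySem.Dict String (List Int) := PySem.Dict.mk feature_types
  let d1 : PySem.Dict String (List Int) := PySem.Dict.mk (dataframe_initializer_json.map
    (fun kv => (kv.1, kv.2 ++ [match ftD.get? kv.1 with
                               | some l => (l.length : Int)
                               | none => 0])))
  (feature_types.foldl
    (fun d kv =>
      if d.contains kv.1 then d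
      else d.insert kv.1 (List.replicate number_of_entries.toNat 0 ++ [(kv.2.length : Int)]))
    d1).items

-- ===== PRECONDITION & SPEC =====
-- Pre_ excludes association lists with duplicate keys: the Python arguments are dicts,
-- which cannot carry duplicate keys, so such lists do not represent any Python input
-- (a Python dict literal with a repeated key silently collapses it).
def Pre_update_statistic_dataframe_py (feature_types : List (String × List Int)) (dataframe_initializer_json : List (String × List Int)) (number_of_entries : Int) : Prop :=
  (feature_types.map Prod.fst).Nodup ∧ (dataframe_initializer_json.map Prod.fst).Nodup
instance (feature_types : List (String × List Int)) (dataframe_initializer_json : List (String × List Int)) (number_of_entries : Int) : Decidable (Pre_update_statistic_dataframe_py feature_types dataframe_initializer_json number_of_entries) := by unfold Pre_update_statistic_dataframe_py; infer_instance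

def pvWitness_update_statistic_dataframe_py : (List (String × List Int)) × (List (String × List Int)) × Int :=
  ([("a", [1, 2]), ("c", [])], [("b", [3]), ("a", [4])], 2)

def Spec_update_statistic_dataframe_py (feature_types : List (String × List Int)) (dataframe_initializer_json : List (String × List Int)) (number_of_entries : Int) (out : List (String × List Int)) : Prop := out = update_statistic_dataframe_py_alt feature_types dataframe_initializer_json number_of_entries
instance (feature_types : List (String × List Int)) (dataframe_initializer_json : List (String × List Int)) (number_of_entries : Int) (out : List (String × List Int)) : Decidable (Spec_update_statistic_dataframe_py feature_types dataframe_initializer_json number_of_entries out) := by unfold Spec_update_statistic_dataframe_py; infer_instance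

-- ===== CLAIM (what is proved, stated in full; the proofs are below) =====
def Claim_equal_update_statistic_dataframe_py : Prop := ∀ (feature_types : List (String × List Int)) (dataframe_initializer_json : List (String × List Int)) (number_of_entries : Int), Dom_update_statistic_dataframe_py feature_types dataframe_initializer_json number_of_entries → Pre_update_statistic_dataframe_py feature_types dataframe_initializer_json number_of_entries → Spec_update_statistic_dataframe_py feature_types dataframe_initializer_json number_of_entries (update_statistic_dataframe_py feature_types dataframe_initializer_json number_of_entries)

-- ===== LEMMAS AND PROOFS =====

theorem items_modify_of_contains (d : PySem.Dict String (List Int)) (k : String)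
    (f : List Int → List Int) (h : d.contains k = true) :
    (d.modify k [] f).items
      = d.items.map (fun p => if p.1 == k then (k, f (d.getD k [])) else p) := by
  simp [PySem.Dict.modify, PySem.Dict.insert, h]

theorem keys_modify_of_contains (d : PySem.Dict String (List Int)) (k : String)
    (f : List Int → List Int) (h : d.contains k = true) :
    (d.modify k [] f).keys = d.keys := by
  simp only [PySem.Dict.keys, items_modify_of_contains d k f h, List.map_map]
  apply List.map_congr_left
  intro p _
  by_cases h2 : p.1 = k <;> simp [h2]

theorem contains_modify_of_contains (d : PySem.Dict String (List Int)) (k x : String)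
    (f : List Int → List Int) (h : d.contains k = true) :
    (d.modify k [] f).contains x = d.contains x := by
  rw [PySem.Dict.contains_eq_decide_mem_keys, PySem.Dict.contains_eq_decide_mem_keys,
      keys_modify_of_contains d k f h]

theorem zeroLoop_items (rem : List String) :
    ∀ (d : PySem.Dict String (List Int)), d.keys.Nodup → rem.Nodup →
    (∀ k ∈ rem, d.contains k = true) →
    (rem.foldl (fun d k => d.modify k [] (fun l => l ++ [(0 : Int)])) d).items
      = d.items.map (fun p => (p.1, p.2 ++ if p.1 ∈ rem then [(0 : Int)] else [])) := by
  induction rem with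
  | nil => intro d _ _ _; simp
  | cons k rest ih =>
    intro d hnd hnr hmem
    have hkrest : k ∉ rest := (List.nodup_cons.mp hnr).1
    have hrest : rest.Nodup := (List.nodup_cons.mp hnr).2
    have hk : d.contains k = true := hmem k (List.mem_cons_self)
    simp only [List.foldl_cons]
    rw [ih (d.modify k [] (fun l => l ++ [(0:Int)]))
        (by rw [keys_modify_of_contains d k _ hk]; exact hnd) hrest
        (fun k' hk' => by rw [contains_modify_of_contains d k k' _ hk]; exact hmem k' (List.mem_cons_of_mem _ hk'))]
    rw [items_modify_of_contains d k _ hk, List.map_map]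
    apply List.map_congr_left
    intro p hp
    by_cases h2 : p.1 = k
    · have hmem2 : (k, p.2) ∈ d.items := by rw [← h2]; exact hp
      have hpd : d.getD k [] = p.2 := PySem.Dict.getD_of_mem_items d hmem2 hnd []
      simp [Function.comp, h2, hpd, hkrest]
    · simp [Function.comp, h2]

theorem Bloop_items (m : Nat) (ft : List (String × List Int)) :
    ∀ (d : PySem.Dict String (List Int)), (ft.map Prod.fst).Nodup →
    (ft.foldl
      (fun d kv =>
        if d.contains kv.1 then d
        else d.insert kv.1 (List.replicate m 0 ++ [(kv.2.length : Int)])) d).items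
      = d.items ++ (ft.filter (fun kv => !(d.contains kv.1))).map
          (fun kv => (kv.1, List.replicate m 0 ++ [(kv.2.length : Int)])) := by
  induction ft with
  | nil => intro d _; simp
  | cons kv rest ih =>
    intro d hn
    have hkrest : kv.1 ∉ rest.map Prod.fst := (List.nodup_cons.mp hn).1
    have hrest : (rest.map Prod.fst).Nodup := (List.nodup_cons.mp hn).2
    simp only [List.foldl_cons]
    by_cases hc : d.contains kv.1
    · simp only [hc, if_true, List.filter_cons, Bool.not_true]
      rw [ih d hrest]
      simp
    · have hc' : d.contains kv.1 = false := by simpa using hc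
      simp only [hc', Bool.false_eq_true, if_false]
      rw [ih _ hrest]
      rw [PySem.Dict.items_insert_of_not_contains d _ hc']
      have hfilt : rest.filter (fun kv' => !((d.insert kv.1 (List.replicate m 0 ++ [(kv.2.length : Int)])).contains kv'.1))
          = rest.filter (fun kv' => !(d.contains kv'.1)) := by
        apply List.filter_congr
        intro kv' hkv'
        have hne : kv'.1 ≠ kv.1 := by
          intro he
          exact hkrest (he ▸ List.mem_map_of_mem hkv')
        rw [PySem.Dict.contains_insert]
        simp [hne]
      rw [hfilt]
      simp [hc']

def appA (ft : List (String × List Int)) (rem : List String) (k : String) : List Int :=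
  match (PySem.Dict.mk ft).get? k with
  | some l => [(l.length : Int)]
  | none => if k ∈ rem then [(0 : Int)] else []

theorem appA_cons_self (a : String) (b : List Int) (rest : List (String × List Int)) (rem : List String) :
    appA ((a, b) :: rest) rem a = [(b.length : Int)] := by
  simp [appA, PySem.Dict.get?_mk_cons]

theorem appA_cons_ne (a : String) (b : List Int) (rest : List (String × List Int)) (rem : List String)
    (x : String) (h : x ≠ a) :
    appA ((a, b) :: rest) rem x = appA rest rem x := by
  have : (a == x) = false := by simp [Ne.symm h]
  simp [appA, PySem.Dict.get?_mk_cons, this]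

theorem appA_erase_ne (rest : List (String × List Int)) (rem : List String) (a x : String)
    (h : x ≠ a) :
    appA rest (rem.erase a) x = appA rest rem x := by
  simp only [appA]
  cases hg : (PySem.Dict.mk rest).get? x with
  | some l => rfl
  | none => simp [List.mem_erase_of_ne h]

theorem appA_none (rest : List (String × List Int)) (rem : List String) (x : String)
    (h1 : x ∉ rest.map Prod.fst) (h2 : x ∉ rem) :
    appA rest rem x = [] := by
  have : (PySem.Dict.mk rest).get? x = none := by
    rw [PySem.Dict.get?_eq_none_iff_not_mem_keys, PySem.Dict.keys_mk]; exact h1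
  simp [appA, this, h2]

theorem Aloop_items (m : Nat) (ft : List (String × List Int)) :
    ∀ (d : PySem.Dict String (List Int)) (rem : List String),
    d.keys.Nodup → (ft.map Prod.fst).Nodup → rem.Nodup →
    (∀ k ∈ rem, d.contains k = true) →
    (∀ k, d.contains k = true → k ∈ rem ∨ k ∉ ft.map Prod.fst) →
    ((ft.foldl
        (fun (st : PySem.Dict String (List Int) × List String) kv =>
          if st.1.contains kv.1 then
            (st.1.modify kv.1 [] (fun l => l ++ [(kv.2.length : Int)]),
             (PySem.List.remove? st.2 kv.1).getD st.2)
          else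
            ((st.1.insert kv.1 (List.replicate m 0)).modify kv.1 []
               (fun l => l ++ [(kv.2.length : Int)]),
             st.2)) (d, rem)).2.foldl
       (fun d k => d.modify k [] (fun l => l ++ [(0 : Int)]))
       (ft.foldl
        (fun (st : PySem.Dict String (List Int) × List String) kv =>
          if st.1.contains kv.1 then
            (st.1.modify kv.1 [] (fun l => l ++ [(kv.2.length : Int)]),
             (PySem.List.remove? st.2 kv.1).getD st.2)
          else
            ((st.1.insert kv.1 (List.replicate m 0)).modify kv.1 []
               (fun l => l ++ [(kv.2.length : Int)]),
             st.2)) (d, rem)).1).items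
      = d.items.map (fun p => (p.1, p.2 ++ appA ft rem p.1))
        ++ (ft.filter (fun kv => !(d.contains kv.1))).map
             (fun kv => (kv.1, List.replicate m 0 ++ [(kv.2.length : Int)])) := by
  induction ft with
  | nil =>
    intro d rem hnd _ hnr hmem _
    simp only [List.foldl_nil, List.filter_nil, List.map_nil, List.append_nil]
    rw [zeroLoop_items rem d hnd hnr hmem]
    apply List.map_congr_left
    intro p _
    simp [appA, PySem.Dict.get?]
  | cons kv rest ih =>
    obtain ⟨a, b⟩ := kv
    intro d rem hnd hn hnr hmem hcov
    have hn' : (a :: rest.map Prod.fst).Nodup := by simpa using hn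
    have hkrest : a ∉ rest.map Prod.fst := (List.nodup_cons.mp hn').1
    have hrest : (rest.map Prod.fst).Nodup := (List.nodup_cons.mp hn').2
    simp only [List.foldl_cons]
    by_cases hc : d.contains a = true
    · -- existing column: append the feature count, drop a from the remaining keys
      have hkrem : a ∈ rem := by
        rcases hcov a hc with h | h
        · exact h
        · exact absurd (by simp) h
      have hrem : PySem.List.remove? rem a = some (rem.erase a) :=
        PySem.List.remove?_eq_some_erase rem a hkrem
      have hkeys' : (d.modify a [] (fun l => l ++ [(b.length : Int)])).keys = d.keys :=
        keys_modify_of_contains d a _ hc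
      have hcont' : ∀ x, (d.modify a [] (fun l => l ++ [(b.length : Int)])).contains x = d.contains x :=
        fun x => contains_modify_of_contains d a x _ hc
      simp only [hc, if_true, hrem, Option.getD_some]
      rw [ih (d.modify a [] (fun l => l ++ [(b.length : Int)])) (rem.erase a)
          (hkeys' ▸ hnd) hrest (hnr.erase a)
          (fun k hk => by rw [hcont']; exact hmem k (List.mem_of_mem_erase hk))
          (fun k hk => by
            rcases hcov k ((hcont' k) ▸ hk) with h | h
            · by_cases he : k = a
              · right; rw [he]; exact hkrest
              · left; exact (List.mem_erase_of_ne he).mpr h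
            · right; intro hm; exact h (List.mem_cons_of_mem _ hm))]
      rw [items_modify_of_contains d a _ hc, List.map_map]
      have hfilt : rest.filter (fun kv' => !((d.modify a [] (fun l => l ++ [(b.length : Int)])).contains kv'.1))
          = rest.filter (fun kv' => !(d.contains kv'.1)) := by
        apply List.filter_congr; intro kv' _; rw [hcont']
      have hfilt2 : ((a, b) :: rest).filter (fun kv' => !(d.contains kv'.1))
          = rest.filter (fun kv' => !(d.contains kv'.1)) := by
        simp [hc]
      rw [hfilt, hfilt2]
      congr 1
      apply List.map_congr_left
      intro p hp
      by_cases h2 : p.1 = a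
      · have hmem2 : (a, p.2) ∈ d.items := by rw [← h2]; exact hp
        have hpd : d.getD a [] = p.2 := PySem.Dict.getD_of_mem_items d hmem2 hnd []
        have happ1 : appA rest (rem.erase a) a = [] :=
          appA_none rest (rem.erase a) a hkrest (List.Nodup.not_mem_erase hnr)
        have hba : (p.1 == a) = true := by simp [h2]
        simp only [Function.comp, hba, if_true]
        rw [h2, appA_cons_self, happ1]
        simp [hpd]
      · have hba : (p.1 == a) = false := by simp [h2]
        simp only [Function.comp, hba, Bool.false_eq_true, if_false]
        rw [appA_erase_ne rest rem a p.1 h2, appA_cons_ne a b rest rem p.1 h2]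
    · -- new column: [0]*m ++ [count] appended at the end
      have hc' : d.contains a = false := by simpa using hc
      have hknotrem : a ∉ rem := fun hx => hc (hmem a hx)
      have hins : (d.insert a (List.replicate m 0)).modify a [] (fun l => l ++ [(b.length : Int)])
          = d.insert a (List.replicate m 0 ++ [(b.length : Int)]) := by
        rw [PySem.Dict.modify, PySem.Dict.getD_insert_self, PySem.Dict.insert_insert_self]
      simp only [hc', Bool.false_eq_true, if_false, hins]
      have hitems' : (d.insert a (List.replicate m 0 ++ [(b.length : Int)])).items
          = d.items ++ [(a, List.replicate m 0 ++ [(b.length : Int)])] :=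
        PySem.Dict.items_insert_of_not_contains d _ hc'
      have hkeys' : (d.insert a (List.replicate m 0 ++ [(b.length : Int)])).keys = d.keys ++ [a] := by
        simp [PySem.Dict.keys, hitems']
      have hknotd : a ∉ d.keys := fun hx => hc ((PySem.Dict.contains_iff_mem_keys d a).mpr hx)
      rw [ih (d.insert a (List.replicate m 0 ++ [(b.length : Int)])) rem
          (by rw [hkeys']
              refine hnd.append (List.nodup_singleton a) ?_
              intro x hx hxa
              rw [List.mem_singleton] at hxa
              exact hknotd (hxa ▸ hx))
          hrest hnr
          (fun k hk => by rw [PySem.Dict.contains_insert, hmem k hk]; simp)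
          (fun k hk => by
            rw [PySem.Dict.contains_insert] at hk
            rcases Bool.or_eq_true_iff.mp hk with h | h
            · right; have hka : k = a := by simpa using h
              rw [hka]; exact hkrest
            · rcases hcov k h with h2 | h2
              · left; exact h2
              · right; intro hm; exact h2 (List.mem_cons_of_mem _ hm))]
      rw [hitems', List.map_append]
      have happkv : appA rest rem a = [] := appA_none rest rem a hkrest hknotrem
      have hfilt : rest.filter (fun kv' => !((d.insert a (List.replicate m 0 ++ [(b.length : Int)])).contains kv'.1))
          = rest.filter (fun kv' => !(d.contains kv'.1)) := by
        apply List.filter_congr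
        intro kv' hkv'
        have hne : kv'.1 ≠ a := fun he => hkrest (he ▸ List.mem_map_of_mem hkv')
        rw [PySem.Dict.contains_insert]
        simp [hne]
      have hfilt2 : ((a, b) :: rest).filter (fun kv' => !(d.contains kv'.1))
          = (a, b) :: rest.filter (fun kv' => !(d.contains kv'.1)) := by
        simp [hc']
      rw [hfilt, hfilt2]
      have hmapc : d.items.map (fun p => (p.1, p.2 ++ appA rest rem p.1))
          = d.items.map (fun p => (p.1, p.2 ++ appA ((a, b) :: rest) rem p.1)) := by
        apply List.map_congr_left
        intro p hp
        have hne : p.1 ≠ a := fun he => hknotd (he ▸ List.mem_map_of_mem hp)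
        rw [appA_cons_ne a b rest rem p.1 hne]
      rw [hmapc]
      simp [happkv]

theorem main_eq : ∀ (ft dj : List (String × List Int)) (n : Int),
    Pre_update_statistic_dataframe_py ft dj n →
    update_statistic_dataframe_py ft dj n = update_statistic_dataframe_py_alt ft dj n := by
  intro ft dj n hpre
  obtain ⟨hft, hdj⟩ := hpre
  simp only [update_statistic_dataframe_py, update_statistic_dataframe_py_alt]
  have hkm : (PySem.Dict.mk ft).keys = ft.map Prod.fst := PySem.Dict.keys_mk ft
  have hnodupft : (PySem.Dict.mk ft).keys.Nodup := by rw [hkm]; exact hft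
  rw [hkm, List.foldl_map]
  rw [PySem.List.foldl_congr_mem ft _
      (fun (st : PySem.Dict String (List Int) × List String) kv =>
        if st.1.contains kv.1 then
          (st.1.modify kv.1 [] (fun l => l ++ [(kv.2.length : Int)]),
           (PySem.List.remove? st.2 kv.1).getD st.2)
        else
          ((st.1.insert kv.1 (List.replicate n.toNat 0)).modify kv.1 []
             (fun l => l ++ [(kv.2.length : Int)]),
           st.2))
      _
      (fun acc kv hkv => by
        have hmemi : (kv.1, kv.2) ∈ (PySem.Dict.mk ft).items := by
          rw [Prod.mk.eta]; exact hkv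
        have hg : (PySem.Dict.mk ft).get? kv.1 = some kv.2 :=
          PySem.Dict.get?_of_mem_items _ hmemi hnodupft
        simp [hg])]
  have hkeysdj : (PySem.Dict.mk dj).keys = dj.map Prod.fst := PySem.Dict.keys_mk dj
  have hnodupdj : (PySem.Dict.mk dj).keys.Nodup := by rw [hkeysdj]; exact hdj
  rw [Aloop_items n.toNat ft (PySem.Dict.mk dj) (PySem.Dict.mk dj).keys
      hnodupdj hft hnodupdj
      (fun k hk => (PySem.Dict.contains_iff_mem_keys _ k).mpr hk)
      (fun k hk => Or.inl ((PySem.Dict.contains_iff_mem_keys _ k).mp hk))]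
  rw [Bloop_items n.toNat ft _ hft]
  have hcont1 : ∀ x, (PySem.Dict.mk (dj.map (fun kv =>
      (kv.1, kv.2 ++ [match (PySem.Dict.mk ft).get? kv.1 with
                      | some l => (l.length : Int)
                      | none => 0])))).contains x = (PySem.Dict.mk dj).contains x := by
    intro x
    simp only [PySem.Dict.contains, List.any_map]
    rfl
  congr 1
  · -- the mapped existing columns agree
    show dj.map (fun p => (p.1, p.2 ++ appA ft (PySem.Dict.mk dj).keys p.1))
        = dj.map (fun kv => (kv.1, kv.2 ++ [match (PySem.Dict.mk ft).get? kv.1 with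
                                            | some l => (l.length : Int)
                                            | none => 0]))
    apply List.map_congr_left
    intro p hp
    have hmemk : p.1 ∈ (PySem.Dict.mk dj).keys := by
      rw [hkeysdj]; exact List.mem_map_of_mem hp
    simp only [appA]
    cases hg : (PySem.Dict.mk ft).get? p.1 with
    | some l => simp
    | none =>
      simp only [hmemk, if_pos]
  · -- the appended new columns agree
    congr 1
    apply List.filter_congr
    intro kv _
    rw [hcont1]

-- ===== VERDICT (by name: the statement is the Claim_ definition above) =====
theorem update_statistic_dataframe_py_spec : Claim_equal_update_statistic_dataframe_py := by
  intro feature_types dataframe_initializer_json number_of_entries _ hpre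
  unfold Spec_update_statistic_dataframe_py
  exact main_eq feature_types dataframe_initializer_json number_of_entries hpre
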